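-- pv_equiv track=rewrite | github.com/TayDa64/multimodal-ai-music-gen | multimodal_gen/intelligence/midi_bridge.py | _find_port_index
-- ===== SOURCE A (Python) =====
-- from typing import Any, Dict, List, Optional
--
-- def _find_port_index(ports: List[str], name: str) -> Optional[int]:
--     """Find port index by exact match or case-insensitive substring."""
--     lower = name.lower()
--     for i, p in enumerate(ports):
--         if p == name:
--             return i
--     for i, p in enumerate(ports):
--         if lower in p.lower():
--             return i
--     return None
-- ===== SOURCE B (Python) =====
-- from typing import List, Optional
--
-- def _find_port_index(ports: List[str], name: str) -> Optional[int]: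
--     """Find port index by exact match or case-insensitive substring (single pass)."""
--     lower = name.lower()
--     fallback = None
--     for i, p in enumerate(ports):
--         if p == name:
--             return i
--         if fallback is None and lower in p.lower():
--             fallback = i
--     return fallback
-- ===== Notes on version B (the rewrite author's own statement) =====
-- stated objective: simpler
-- what changed: A's two sequential scans (exact match, then case-insensitive substring) are merged into a single pass that returns immediately on an exact hit and records the first substring hit as a fallback returned after the loop.
import Mathlib
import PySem

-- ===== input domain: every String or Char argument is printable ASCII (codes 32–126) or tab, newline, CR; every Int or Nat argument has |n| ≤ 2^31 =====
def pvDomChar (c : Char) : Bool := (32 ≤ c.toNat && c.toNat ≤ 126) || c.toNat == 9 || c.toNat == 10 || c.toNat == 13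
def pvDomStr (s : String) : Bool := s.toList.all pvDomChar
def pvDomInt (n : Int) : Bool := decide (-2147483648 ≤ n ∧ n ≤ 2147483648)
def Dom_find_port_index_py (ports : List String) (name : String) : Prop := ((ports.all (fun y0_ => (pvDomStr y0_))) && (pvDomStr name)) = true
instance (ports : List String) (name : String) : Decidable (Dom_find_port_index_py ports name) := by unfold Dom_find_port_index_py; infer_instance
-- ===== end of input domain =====

-- B merges A's two sequential scans (exact, then case-insensitive substring) into one pass
-- with a recorded fallback index; same return value, simpler single traversal.


-- ===== PORT A =====
-- first loop: 'for i, p in enumerate(ports): if p == name: return i'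
def pvScanExact (ports : List String) (name : String) (i : Int) : Option Int :=
  match ports with
  | [] => none
  | p :: rest => if p = name then some i else pvScanExact rest name (i + 1)

-- second loop: 'for i, p in enumerate(ports): if lower in p.lower(): return i'
def pvScanSub (ports : List String) (lower : String) (i : Int) : Option Int :=
  match ports with
  | [] => none
  | p :: rest =>
    if PySem.Str.isIn lower (PySem.Str.lower p) then some i
    else pvScanSub rest lower (i + 1)

def find_port_index_py (ports : List String) (name : String) : Option Int :=
  match pvScanExact ports name 0 with
  | some i => some i
  | none => pvScanSub ports (PySem.Str.lower name) 0

-- ===== PORT B =====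
-- single loop: return i on exact hit, otherwise record first substring hit in 'fallback'
def pvLoopB (ports : List String) (name lower : String) (i : Int) (fallback : Option Int) :
    Option Int :=
  match ports with
  | [] => fallback
  | p :: rest =>
    if p = name then some i
    else
      pvLoopB rest name lower (i + 1)
        (if fallback.isNone && PySem.Str.isIn lower (PySem.Str.lower p) then some i else fallback)

def find_port_index_py_alt (ports : List String) (name : String) : Option Int :=
  pvLoopB ports name (PySem.Str.lower name) 0 none

-- ===== PRECONDITION & SPEC =====
def Spec_find_port_index_py (ports : List String) (name : String) (out : Option Int) : Prop := out = find_port_index_py_alt ports name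
instance (ports : List String) (name : String) (out : Option Int) : Decidable (Spec_find_port_index_py ports name out) := by unfold Spec_find_port_index_py; infer_instance

-- ===== CLAIM (what is proved, stated in full; the proofs are below) =====
def Claim_equal_find_port_index_py : Prop := ∀ (ports : List String) (name : String), Dom_find_port_index_py ports name → Spec_find_port_index_py ports name (find_port_index_py ports name)

-- ===== LEMMAS AND PROOFS =====
-- B's one-pass loop equals: exact scan first, else the recorded fallback, else the substring scan.
theorem pvLoopB_eq (ports : List String) (name lower : String) :
    ∀ (i : Int) (fb : Option Int),
      pvLoopB ports name lower i fb =
        match pvScanExact ports name i with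
        | some j => some j
        | none =>
          match fb with
          | some f => some f
          | none => pvScanSub ports lower i := by
  induction ports with
  | nil => intro i fb; cases fb <;> rfl
  | cons p rest ih =>
    intro i fb
    by_cases hx : p = name
    · simp [pvLoopB, pvScanExact, hx]
    · rw [show pvLoopB (p :: rest) name lower i fb
            = pvLoopB rest name lower (i + 1)
                (if fb.isNone && PySem.Str.isIn lower (PySem.Str.lower p) then some i else fb)
            from by simp [pvLoopB, hx],
          ih]
      cases hex : pvScanExact rest name (i + 1) with
      | some j => simp [pvScanExact, hx, hex]
      | none =>
        cases fb with
        | some f => simp [pvScanExact, pvScanSub, hx, hex]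
        | none =>
          by_cases hs : PySem.Chars.isIn lower.toList (PySem.Chars.lower p.toList)
          · simp [pvScanExact, pvScanSub, hx, hex, PySem.Str.isIn, PySem.Str.lower, hs]
          · simp [pvScanExact, pvScanSub, hx, hex, PySem.Str.isIn, PySem.Str.lower, hs]

-- ===== VERDICT (by name: the statement is the Claim_ definition above) =====
theorem find_port_index_py_spec : Claim_equal_find_port_index_py := by
  intro ports name _
  unfold Spec_find_port_index_py find_port_index_py find_port_index_py_alt
  rw [pvLoopB_eq]
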